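-- pv_equiv track=rewrite | github.com/thein3000/code_problems | app_analytics/analytics_engine/core.py | identify_multiple_order_status
-- ===== SOURCE A (Python) =====
-- import itertools
-- import copy
--
-- def identify_order_status(data):
--     """Given a list of order lines from a common order, returns the overall status."""
--     PENDING = "PENDING"
--     SHIPPED = "SHIPPED"
--     CANCELLED = "CANCELLED"
--
--     status_counts = {
--         SHIPPED: 0,
--         PENDING: 0,
--         CANCELLED: 0
--     }
--     for order in data:
--         if order["status"] == SHIPPED:
--             status_counts[SHIPPED] += 1
--         elif order["status"] == PENDING:
--             status_counts[PENDING] += 1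
--         else:
--             status_counts[CANCELLED] += 1
--
--     if status_counts[PENDING] > 0:
--         return PENDING
--     elif status_counts[CANCELLED] > 0 and status_counts[SHIPPED] == 0:
--         return CANCELLED
--     return SHIPPED
--
-- def identify_multiple_order_status(data):
--     """Given a list of order lines, returns the orders with the respective overall status."""
--     order_line_list = copy.deepcopy(data)
--     order_list = []
--
--     key_func = lambda x: x["order_number"]
--
--     for key, group in itertools.groupby(order_line_list, key_func):
--         order_list.append({
--             "order_number": key,
--             "status": identify_order_status(group)
--         })
--     return order_list
-- ===== SOURCE B (Python) =====
-- RANK = {"SHIPPED": 1, "PENDING": 2}          # unknown statuses rank 0 (treated as cancelled)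
-- NAME = {0: "CANCELLED", 1: "SHIPPED", 2: "PENDING"}
--
-- def identify_multiple_order_status(data):
--     """Given a list of order lines, returns the orders with the respective overall status."""
--     keys = [line["order_number"] for line in data]
--     ranks = [RANK.get(line["status"], 0) for line in data]
--     bounds = [i for i in range(len(data)) if i == 0 or keys[i] != keys[i - 1]] + [len(data)]
--     return [{"order_number": keys[a], "status": NAME[max(ranks[a:b])]}
--             for a, b in zip(bounds, bounds[1:])]
-- ===== Notes on version B (the rewrite author's own statement) =====
-- stated objective: alternative
-- what changed: Replaces itertools.groupby plus a per-group status-counting dict and precedence if-chain (and the deepcopy) with staged vectorized passes: map each line to a numeric rank (PENDING=2, SHIPPED=1, other=0), compute run-boundary indices by comparing adjacent keys, then emit each segment's status as a table lookup of the segment's max rank.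
import Mathlib
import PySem

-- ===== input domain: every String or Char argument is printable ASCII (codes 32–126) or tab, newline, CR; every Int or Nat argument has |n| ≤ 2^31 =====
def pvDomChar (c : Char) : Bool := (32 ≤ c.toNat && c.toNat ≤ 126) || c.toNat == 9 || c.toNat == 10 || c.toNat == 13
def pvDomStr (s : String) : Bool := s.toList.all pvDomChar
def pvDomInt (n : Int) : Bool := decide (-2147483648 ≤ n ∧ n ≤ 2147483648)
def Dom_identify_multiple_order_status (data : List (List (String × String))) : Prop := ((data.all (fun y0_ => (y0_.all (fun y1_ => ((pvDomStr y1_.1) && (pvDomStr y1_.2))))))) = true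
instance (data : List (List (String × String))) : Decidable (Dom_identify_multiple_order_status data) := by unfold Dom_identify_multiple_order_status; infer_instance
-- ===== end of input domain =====

-- B replaces groupby + a per-group counting dict (and the deepcopy) with staged passes:
-- per-line numeric ranks, run-boundary indices from adjacent-key comparison, and a
-- max-rank table lookup per segment; objective: alternative (same cost, different shape).

-- ===== PORT A =====
-- dict[k] as first-match lookup on the association list; the .getD "" default is never
-- reached under Pre_ (both keys present); where a key is missing Python raises KeyError.
def pvDGet (l : List (String × String)) (k : String) : Option String :=
  match l with
  | [] => none
  | (a, b) :: rest => if a == k then some b else pvDGet rest k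

def pvKey (l : List (String × String)) : String := (pvDGet l "order_number").getD ""
def pvStatus (l : List (String × String)) : String := (pvDGet l "status").getD ""

-- the loop body of identify_order_status (status_counts[...] += 1)
def pvCountStep (d : PySem.Dict String Int) (order : List (String × String)) : PySem.Dict String Int :=
  if pvStatus order == "SHIPPED" then d.modify "SHIPPED" 0 (· + 1)
  else if pvStatus order == "PENDING" then d.modify "PENDING" 0 (· + 1)
  else d.modify "CANCELLED" 0 (· + 1)

-- identify_order_status: count statuses into a dict, then the precedence rule
def identify_order_status_port (g : List (List (String × String))) : String :=
  let d := g.foldl pvCountStep (PySem.Dict.ofList [("SHIPPED", 0), ("PENDING", 0), ("CANCELLED", 0)])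
  if 0 < d.getD "PENDING" 0 then "PENDING"
  else if 0 < d.getD "CANCELLED" 0 ∧ d.getD "SHIPPED" 0 = 0 then "CANCELLED"
  else "SHIPPED"

-- itertools.groupby(·, key_func): consecutive runs of equal keys
def pvGroups : List (List (String × String)) → List (String × List (List (String × String)))
  | [] => []
  | l :: rest =>
    let k := pvKey l
    (k, l :: rest.takeWhile (fun x => pvKey x == k)) ::
      pvGroups (rest.dropWhile (fun x => pvKey x == k))
termination_by l => l.length
decreasing_by
  have := List.length_dropWhile_le (fun x => pvKey x == pvKey l) rest
  simp; omega

def identify_multiple_order_status (data : List (List (String × String))) : List (List (String × String)) :=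
  (pvGroups data).map (fun p => [("order_number", p.1), ("status", identify_order_status_port p.2)])

-- ===== PORT B =====
-- RANK.get(line["status"], 0) for the 2-entry literal dict {"SHIPPED": 1, "PENDING": 2}
def pvRank (l : List (String × String)) : Nat :=
  if pvStatus l == "SHIPPED" then 1 else if pvStatus l == "PENDING" then 2 else 0

-- NAME[r] for the literal dict {0: "CANCELLED", 1: "SHIPPED", 2: "PENDING"}; r is always 0/1/2
def pvName (r : Nat) : String :=
  if r == 2 then "PENDING" else if r == 1 then "SHIPPED" else "CANCELLED"

-- Python max(...) on a slice; the slice is nonempty (bounds are strictly increasing), [] unreachable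
def pvSegMax : List Nat → Nat
  | [] => 0
  | x :: xs => xs.foldl max x

-- the boundary predicate of Source B's list comprehension
def pvBpred (keys : List String) (i : Nat) : Bool :=
  i == 0 || !(keys.getD i "" == keys.getD (i - 1) "")

-- keys[i] / ranks[a:b] are in-range Python accesses: getD / drop-take is exact for
-- 0 ≤ i < len and 0 ≤ a ≤ b ≤ len, which the boundary construction guarantees.
def identify_multiple_order_status_alt (data : List (List (String × String))) : List (List (String × String)) :=
  let keys := data.map pvKey
  let ranks := data.map pvRank
  let bounds := (List.range data.length).filter (pvBpred keys) ++ [data.length]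
  (bounds.zip bounds.tail).map (fun p =>
    [("order_number", keys.getD p.1 ""),
     ("status", pvName (pvSegMax ((ranks.drop p.1).take (p.2 - p.1))))])

-- ===== PRECONDITION & SPEC =====
-- Pre_ excludes exactly the inputs where A raises KeyError: some line lacks the
-- "order_number" or "status" key.
def Pre_identify_multiple_order_status (data : List (List (String × String))) : Prop :=
  ∀ l ∈ data, "order_number" ∈ l.map Prod.fst ∧ "status" ∈ l.map Prod.fst
instance (data : List (List (String × String))) : Decidable (Pre_identify_multiple_order_status data) := by unfold Pre_identify_multiple_order_status; infer_instance

def pvWitness_identify_multiple_order_status : (List (List (String × String))) :=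
  [[("order_number", "1"), ("status", "PENDING")],
   [("order_number", "1"), ("status", "SHIPPED")],
   [("order_number", "2"), ("status", "weird")]]

def Spec_identify_multiple_order_status (data : List (List (String × String))) (out : List (List (String × String))) : Prop := out = identify_multiple_order_status_alt data
instance (data : List (List (String × String))) (out : List (List (String × String))) : Decidable (Spec_identify_multiple_order_status data out) := by unfold Spec_identify_multiple_order_status; infer_instance

-- ===== CLAIM (what is proved, stated in full; the proofs are below) =====
def Claim_equal_identify_multiple_order_status : Prop := ∀ (data : List (List (String × String))), Dom_identify_multiple_order_status data → Pre_identify_multiple_order_status data → Spec_identify_multiple_order_status data (identify_multiple_order_status data)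


-- ===== LEMMAS AND PROOFS =====

-- proof-only abbreviations for B's let-bound stages
def pvFB (data : List (List (String × String))) : List Nat :=
  (List.range data.length).filter (pvBpred (data.map pvKey)) ++ [data.length]

def pvOut (data : List (List (String × String))) (p : Nat × Nat) : List (String × String) :=
  [("order_number", (data.map pvKey).getD p.1 ""),
   ("status", pvName (pvSegMax (((data.map pvRank).drop p.1).take (p.2 - p.1))))]

theorem alt_def (data : List (List (String × String))) :
    identify_multiple_order_status_alt data = ((pvFB data).zip (pvFB data).tail).map (pvOut data) := rfl

def pvAnyP (g : List (List (String × String))) : Bool := g.any (fun x => pvStatus x == "PENDING")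
def pvAnyS (g : List (List (String × String))) : Bool := g.any (fun x => pvStatus x == "SHIPPED")
def pvAnyO (g : List (List (String × String))) : Bool :=
  g.any (fun x => !(pvStatus x == "SHIPPED") && !(pvStatus x == "PENDING"))

theorem countsP (g : List (List (String × String))) (d : PySem.Dict String Int) :
    (g.foldl pvCountStep d).getD "PENDING" 0 =
      d.getD "PENDING" 0 + (g.countP (fun x => pvStatus x == "PENDING") : Int) := by
  induction g generalizing d with
  | nil => simp
  | cons x xs ih =>
    simp only [List.foldl_cons, ih, List.countP_cons]
    by_cases h1 : pvStatus x = "SHIPPED" <;> by_cases h2 : pvStatus x = "PENDING" <;>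
      simp_all [pvCountStep, PySem.Dict.getD_modify]; omega

theorem countsS (g : List (List (String × String))) (d : PySem.Dict String Int) :
    (g.foldl pvCountStep d).getD "SHIPPED" 0 =
      d.getD "SHIPPED" 0 + (g.countP (fun x => pvStatus x == "SHIPPED") : Int) := by
  induction g generalizing d with
  | nil => simp
  | cons x xs ih =>
    simp only [List.foldl_cons, ih, List.countP_cons]
    by_cases h1 : pvStatus x = "SHIPPED" <;> by_cases h2 : pvStatus x = "PENDING" <;>
      simp_all [pvCountStep, PySem.Dict.getD_modify]; omega

theorem countsC (g : List (List (String × String))) (d : PySem.Dict String Int) :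
    (g.foldl pvCountStep d).getD "CANCELLED" 0 =
      d.getD "CANCELLED" 0 +
        (g.countP (fun x => !(pvStatus x == "SHIPPED") && !(pvStatus x == "PENDING")) : Int) := by
  induction g generalizing d with
  | nil => simp
  | cons x xs ih =>
    simp only [List.foldl_cons, ih, List.countP_cons]
    by_cases h1 : pvStatus x = "SHIPPED" <;> by_cases h2 : pvStatus x = "PENDING" <;>
      simp_all [pvCountStep, PySem.Dict.getD_modify]; omega

theorem status_eq (g : List (List (String × String))) :
    identify_order_status_port g =
      (if pvAnyP g then "PENDING" else if pvAnyO g && !pvAnyS g then "CANCELLED" else "SHIPPED") := by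
  have hP := countsP g (PySem.Dict.ofList [("SHIPPED", 0), ("PENDING", 0), ("CANCELLED", 0)])
  have hS := countsS g (PySem.Dict.ofList [("SHIPPED", 0), ("PENDING", 0), ("CANCELLED", 0)])
  have hC := countsC g (PySem.Dict.ofList [("SHIPPED", 0), ("PENDING", 0), ("CANCELLED", 0)])
  rw [show (PySem.Dict.ofList [("SHIPPED", (0 : Int)), ("PENDING", 0), ("CANCELLED", 0)]).getD "PENDING" 0 = 0 from rfl, zero_add] at hP
  rw [show (PySem.Dict.ofList [("SHIPPED", (0 : Int)), ("PENDING", 0), ("CANCELLED", 0)]).getD "SHIPPED" 0 = 0 from rfl, zero_add] at hS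
  rw [show (PySem.Dict.ofList [("SHIPPED", (0 : Int)), ("PENDING", 0), ("CANCELLED", 0)]).getD "CANCELLED" 0 = 0 from rfl, zero_add] at hC
  have aP : (0 < ((g.countP (fun x => pvStatus x == "PENDING") : Nat) : Int)) ↔ pvAnyP g = true := by
    simp [pvAnyP, List.any_eq_true, List.countP_pos_iff]
  have aS : (((g.countP (fun x => pvStatus x == "SHIPPED") : Nat) : Int) = 0) ↔ pvAnyS g = false := by
    simp [pvAnyS, List.any_eq_false, List.countP_eq_zero]
  have aO : (0 < ((g.countP (fun x => !(pvStatus x == "SHIPPED") && !(pvStatus x == "PENDING")) : Nat) : Int)) ↔ pvAnyO g = true := by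
    simp [pvAnyO, List.any_eq_true, List.countP_pos_iff]
  have cond2 : (0 < ((g.countP (fun x => !(pvStatus x == "SHIPPED") && !(pvStatus x == "PENDING")) : Nat) : Int) ∧
      ((g.countP (fun x => pvStatus x == "SHIPPED") : Nat) : Int) = 0) ↔ (pvAnyO g && !pvAnyS g) = true := by
    constructor
    · rintro ⟨h1, h2⟩
      simp [aO.mp h1, aS.mp h2]
    · intro h
      rw [Bool.and_eq_true, Bool.not_eq_true'] at h
      exact ⟨aO.mpr h.1, aS.mpr h.2⟩
  simp only [identify_order_status_port, hP, hS, hC]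
  rw [if_congr aP rfl rfl, if_congr cond2 rfl rfl]

theorem dropWhile_head (p : List (String × String) → Bool) :
    ∀ (l : List (List (String × String))) (y : List (String × String)) (t : List (List (String × String))),
    l.dropWhile p = y :: t → p y = false := by
  intro l
  induction l with
  | nil => simp
  | cons a as ih =>
    intro y t h
    by_cases hp : p a
    · rw [List.dropWhile_cons_of_pos hp] at h; exact ih y t h
    · rw [List.dropWhile_cons_of_neg hp] at h
      cases h
      simpa using hp

-- max-rank machinery
theorem foldl_max_init (l : List Nat) : ∀ a : Nat, l.foldl max a = max a (l.foldl max 0) := by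
  induction l with
  | nil => intro a; simp
  | cons x xs ih =>
    intro a
    simp only [List.foldl_cons]
    rw [ih (max a x), ih (max 0 x)]
    omega

theorem maxrank (g : List (List (String × String))) :
    (g.map pvRank).foldl max 0 = (if pvAnyP g then 2 else if pvAnyS g then 1 else 0) := by
  induction g with
  | nil => simp [pvAnyP, pvAnyS]
  | cons x xs ih =>
    simp only [List.map_cons, List.foldl_cons]
    rw [foldl_max_init, ih]
    by_cases h1 : pvStatus x = "SHIPPED" <;> by_cases h2 : pvStatus x = "PENDING" <;>
      simp_all [pvRank, pvAnyP, pvAnyS] <;> split_ifs <;> omega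

theorem name_max (g : List (List (String × String))) (hg : g ≠ []) :
    pvName (pvSegMax (g.map pvRank)) = identify_order_status_port g := by
  obtain ⟨x, xs, rfl⟩ := List.exists_cons_of_ne_nil hg
  have hseg : pvSegMax ((x :: xs).map pvRank) = ((x :: xs).map pvRank).foldl max 0 := by
    simp only [List.map_cons, pvSegMax, List.foldl_cons, Nat.zero_max]
  rw [hseg, maxrank, status_eq]
  by_cases hP : pvAnyP (x :: xs)
  · simp [hP, pvName]
  · by_cases hS : pvAnyS (x :: xs)
    · simp [hP, hS, pvName]
    · have hO : pvAnyO (x :: xs) = true := by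
        have hxS : (pvStatus x == "SHIPPED") = false := by
          simp only [pvAnyS, List.any_cons, Bool.or_eq_true] at hS; simp_all
        have hxP : (pvStatus x == "PENDING") = false := by
          simp only [pvAnyP, List.any_cons, Bool.or_eq_true] at hP; simp_all
        simp [pvAnyO, List.any_cons, hxS, hxP]
      simp [hP, hS, hO, pvName]

-- getD of a constant list
theorem getD_const (ks : List String) (k : String) (h : ∀ x ∈ ks, x = k)
    (i : Nat) (hi : i < ks.length) : ks.getD i "" = k := by
  rw [List.getD_eq_getElem _ _ hi]
  exact h _ (List.getElem_mem hi)

theorem filter_range_zero : ∀ s : Nat, 0 < s → (List.range s).filter (fun i => i == 0) = [0] := by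
  intro s
  induction s with
  | zero => omega
  | succ n ih =>
    intro _
    rw [List.range_succ, List.filter_append]
    cases n with
    | zero => simp
    | succ m =>
      rw [ih (by omega)]
      simp

-- the boundary list of l :: rest = [0] followed by the shifted boundary list of the tail
-- after the first run
theorem fb_cons (l : List (String × String)) (rest : List (List (String × String))) :
    pvFB (l :: rest) =
      0 :: (pvFB (rest.dropWhile (fun x => pvKey x == pvKey l))).map
        ((l :: rest.takeWhile (fun x => pvKey x == pvKey l)).length + ·) := by
  set k := pvKey l with hk
  set gd := l :: rest.takeWhile (fun x => pvKey x == k) with hgd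
  set rest' := rest.dropWhile (fun x => pvKey x == k) with hrest'
  set s := gd.length with hs
  have hdata : l :: rest = gd ++ rest' := by
    rw [hgd, hrest']; simp [List.takeWhile_append_dropWhile]
  have hspos : 0 < s := by rw [hs, hgd]; simp
  have hkeys : (l :: rest).map pvKey = gd.map pvKey ++ rest'.map pvKey := by
    rw [hdata, List.map_append]
  have hconst : ∀ x ∈ gd.map pvKey, x = k := by
    intro x hx
    rw [List.mem_map] at hx
    obtain ⟨y, hy, rfl⟩ := hx
    rw [hgd] at hy
    rcases List.mem_cons.mp hy with rfl | hy'
    · rfl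
    · simpa using List.mem_takeWhile_imp hy'
  have hklen : (gd.map pvKey).length = s := by rw [List.length_map]
  have hgetL : ∀ i : Nat, i < s → ((l :: rest).map pvKey).getD i "" = k := by
    intro i hi
    rw [hkeys, List.getD_append _ _ _ _ (by omega), getD_const _ k hconst i (by omega)]
  have hgetR : ∀ j : Nat, ((l :: rest).map pvKey).getD (s + j) "" = (rest'.map pvKey).getD j "" := by
    intro j
    rw [hkeys, List.getD_append_right _ _ _ _ (by omega)]
    congr 1
    omega
  have hlen : (l :: rest).length = s + rest'.length := by
    rw [hdata, List.length_append]
  rw [pvFB, hlen, List.range_add, List.filter_append]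
  have part1 : (List.range s).filter (pvBpred ((l :: rest).map pvKey)) = [0] := by
    rw [List.filter_congr (q := fun i => i == 0), filter_range_zero s hspos]
    intro i hi
    rw [List.mem_range] at hi
    cases i with
    | zero => simp [pvBpred]
    | succ j =>
      have h1 : ((l :: rest).map pvKey).getD (j + 1) "" = k := hgetL _ hi
      have h2 : ((l :: rest).map pvKey).getD (j + 1 - 1) "" = k := hgetL _ (by omega)
      simp only [pvBpred]
      rw [h1, h2]
      simp
  have part2 : ((List.range rest'.length).map (s + ·)).filter (pvBpred ((l :: rest).map pvKey)) =
      ((List.range rest'.length).filter (pvBpred (rest'.map pvKey))).map (s + ·) := by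
    rw [List.filter_map]
    congr 1
    apply List.filter_congr
    intro j hj
    rw [List.mem_range] at hj
    simp only [Function.comp_apply]
    cases j with
    | zero =>
      obtain ⟨y, t, hyt⟩ : ∃ y t, rest' = y :: t := by
        rcases rest' with _ | ⟨y, t⟩
        · simp at hj
        · exact ⟨y, t, rfl⟩
      have hy : (pvKey y == k) = false := dropWhile_head _ rest y t (hrest' ▸ hyt)
      have h1 : ((l :: rest).map pvKey).getD (s + 0) "" = pvKey y := by
        rw [hgetR 0, hyt]; rfl
      have h2 : ((l :: rest).map pvKey).getD (s + 0 - 1) "" = k := by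
        have : s + 0 - 1 < s := by omega
        exact hgetL _ this
      simp only [pvBpred]
      rw [h1, h2]
      simp [hy]
    | succ jj =>
      have h1 := hgetR (jj + 1)
      have h2 : ((l :: rest).map pvKey).getD (s + (jj + 1) - 1) "" = (rest'.map pvKey).getD jj "" := by
        have : s + (jj + 1) - 1 = s + jj := by omega
        rw [this, hgetR jj]
      simp only [pvBpred]
      rw [h1, h2]
      simp
  rw [part1, part2]
  simp [pvFB, List.map_append]

theorem fb_shape (xs : List (List (String × String))) : ∃ T, pvFB xs = 0 :: T := by
  rcases xs with _ | ⟨y, t⟩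
  · exact ⟨[], rfl⟩
  · rw [fb_cons]
    exact ⟨_, rfl⟩

-- pvOut through the shift by the first run's length
theorem out_shift (gd rest' : List (List (String × String))) (a b : Nat) :
    pvOut (gd ++ rest') (gd.length + a, gd.length + b) = pvOut rest' (a, b) := by
  unfold pvOut
  have h1 : ((gd ++ rest').map pvKey).getD (gd.length + a) "" = (rest'.map pvKey).getD a "" := by
    rw [List.map_append, List.getD_append_right _ _ _ _ (by simp), List.length_map]
    congr 1
    omega
  have h2 : ((gd ++ rest').map pvRank).drop (gd.length + a) = (rest'.map pvRank).drop a := by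
    rw [List.map_append, List.drop_append]
    simp
  have h3 : gd.length + b - (gd.length + a) = b - a := by omega
  rw [h1, h2, h3]

theorem out_head (gd rest' : List (List (String × String))) (k : String)
    (hgd : gd ≠ []) (hconst : ∀ x ∈ gd.map pvKey, x = k) :
    pvOut (gd ++ rest') (0, gd.length) =
      [("order_number", k), ("status", identify_order_status_port gd)] := by
  unfold pvOut
  have h1 : ((gd ++ rest').map pvKey).getD 0 "" = k := by
    rw [List.map_append, List.getD_append _ _ _ _ (by simp [List.length_pos_iff.mpr hgd])]
    exact getD_const _ k hconst 0 (by simp [List.length_pos_iff.mpr hgd])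
  have h2 : (((gd ++ rest').map pvRank).drop 0).take (gd.length - 0) = gd.map pvRank := by
    have hlm : (gd.map pvRank).length = gd.length := List.length_map ..
    rw [List.drop_zero, List.map_append, Nat.sub_zero, ← hlm, List.take_left]
  rw [h1, h2, name_max gd hgd]

theorem agree (data : List (List (String × String))) :
    identify_multiple_order_status data = identify_multiple_order_status_alt data := by
  induction data using pvGroups.induct with
  | case1 =>
    simp [identify_multiple_order_status, identify_multiple_order_status_alt, pvGroups]
  | case2 l rest k ih =>
    have hk : k = pvKey l := rfl
    set gd := l :: rest.takeWhile (fun x => pvKey x == k) with hgd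
    set rest' := rest.dropWhile (fun x => pvKey x == k) with hrest'
    set s := gd.length with hs
    have hdata : l :: rest = gd ++ rest' := by
      rw [hgd, hrest']; simp [List.takeWhile_append_dropWhile]
    have hconst : ∀ x ∈ gd.map pvKey, x = k := by
      intro x hx
      rw [List.mem_map] at hx
      obtain ⟨y, hy, rfl⟩ := hx
      rw [hgd] at hy
      rcases List.mem_cons.mp hy with rfl | hy'
      · exact hk.symm
      · simpa using List.mem_takeWhile_imp hy'
    -- A unfolds to head :: A rest'
    have hA : identify_multiple_order_status (l :: rest) =
        [("order_number", k), ("status", identify_order_status_port gd)] ::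
          identify_multiple_order_status rest' := by
      rw [identify_multiple_order_status, pvGroups]
      rfl
    -- B's boundary list and pairs
    obtain ⟨T, hT⟩ := fb_shape rest'
    have hfb : pvFB (l :: rest) = 0 :: (s + 0) :: (pvFB rest').tail.map (s + ·) := by
      rw [fb_cons, ← hk, ← hgd, ← hrest', ← hs, hT]
      rfl
    have hzip : (pvFB (l :: rest)).zip (pvFB (l :: rest)).tail =
        (0, s + 0) :: ((pvFB rest').zip (pvFB rest').tail).map
          (Prod.map (s + ·) (s + ·)) := by
      rw [hfb, hT]
      simp only [List.zip_cons_cons, List.tail_cons]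
      congr 1
      show (List.map (fun x => s + x) (0 :: T)).zip (List.map (fun x => s + x) T) = _
      exact List.zip_map ..
    rw [alt_def, hzip, List.map_cons, hA, ih, alt_def]
    congr 1
    · have : ((0 : Nat), s + 0) = ((0 : Nat), s) := by simp
      rw [this, hdata, out_head gd rest' k (by rw [hgd]; simp) hconst]
    · rw [List.map_map]
      apply List.map_congr_left
      intro p _
      simp only [Function.comp_apply, Prod.map]
      rw [hdata, out_shift gd rest' p.1 p.2]

-- ===== VERDICT (by name: the statement is the Claim_ definition above) =====
theorem identify_multiple_order_status_spec : Claim_equal_identify_multiple_order_status := by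
  intro data _ _
  unfold Spec_identify_multiple_order_status
  exact agree data
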